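-- pv_equiv track=rewrite | github.com/tssrkt/Learning_Python | tasks/Chekio.py | create_zigzag
-- ===== SOURCE A (Python) =====
-- from typing import List
--
-- def create_zigzag(rows: int, cols: int, start: int = 1) -> List[List[int]]:
--     res = []
--     is_evn = 0
--
--     for x in range(rows):
--         res.append([])
--         for y in range(cols):
--             res[-1].append(start)
--             start += 1
--         if is_evn == 1:
--             a = res[-1]
--             res[-1] = a[::-1]
--             is_evn = 0
--         else:
--             is_evn = 1
--     return res
-- ===== SOURCE B (Python) =====
-- def create_zigzag(rows, cols, start=1):
--     nrows = max(rows, 0)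
--     ncols = max(cols, 0)
--     flat = list(range(start, start + nrows * ncols))
--     res = []
--     for i in range(nrows):
--         row = flat[i * ncols:(i + 1) * ncols]
--         res.append(row[::-1] if i % 2 == 1 else row)
--     return res
-- ===== Notes on version B (the rewrite author's own statement) =====
-- stated objective: alternative
-- what changed: B builds the whole flat integer sequence once with range(start, start+rows*cols) and then reshapes it by slicing one row per index (reversing odd rows), replacing A's accumulator-threaded nested fill loop with mutation of res[-1].
import Mathlib
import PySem

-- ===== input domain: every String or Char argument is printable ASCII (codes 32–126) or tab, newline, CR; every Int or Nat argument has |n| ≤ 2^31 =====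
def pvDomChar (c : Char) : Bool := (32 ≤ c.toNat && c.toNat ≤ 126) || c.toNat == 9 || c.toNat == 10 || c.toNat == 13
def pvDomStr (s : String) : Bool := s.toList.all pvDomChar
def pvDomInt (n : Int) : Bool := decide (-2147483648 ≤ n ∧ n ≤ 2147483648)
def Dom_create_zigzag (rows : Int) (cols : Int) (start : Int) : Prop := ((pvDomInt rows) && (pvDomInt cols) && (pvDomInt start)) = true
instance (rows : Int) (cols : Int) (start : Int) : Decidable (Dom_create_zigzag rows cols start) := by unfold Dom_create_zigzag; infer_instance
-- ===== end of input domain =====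

-- B builds the flat sequence range(start, start+rows*cols) once, then reshapes it by slicing
-- one row per index (reversing odd rows); same asymptotic cost, different decomposition.

-- ===== PORT A =====
-- res[-1].append(v) on a list res = prefix ++ [last] is dropLast ++ [last ++ [v]] (exact: res is always nonempty there)
def pvInnerStepA (p : List (List Int) × Int) (_y : Int) : List (List Int) × Int :=
  (p.1.dropLast ++ [p.1.getLastD [] ++ [p.2]], p.2 + 1)

def pvStepA (cols : Int) (st : List (List Int) × Int × Int) (_x : Int) : List (List Int) × Int × Int :=
  let res := st.1 ++ [([] : List Int)]
  let inner := (PySem.List.pyRange 0 cols 1).foldl pvInnerStepA (res, st.2.2)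
  if st.2.1 == 1 then
    (inner.1.dropLast ++ [(PySem.List.slice? (inner.1.getLastD []) none none (-1)).getD []], 0, inner.2)
  else
    (inner.1, 1, inner.2)

def create_zigzag (rows : Int) (cols : Int) (start : Int) : List (List Int) :=
  ((PySem.List.pyRange 0 rows 1).foldl (pvStepA cols) ([], 0, start)).1

-- ===== PORT B =====
def pvRowB (flat : List Int) (cols : Int) (i : Int) : List Int :=
  let row := PySem.List.slice flat (some (i * cols)) (some ((i + 1) * cols))
  if PySem.Int.mod i 2 == 1 then (PySem.List.slice? row none none (-1)).getD [] else row

def create_zigzag_alt (rows : Int) (cols : Int) (start : Int) : List (List Int) :=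
  let nrows := max rows 0
  let ncols := max cols 0
  let flat := PySem.List.pyRange start (start + nrows * ncols) 1
  (PySem.List.pyRange 0 nrows 1).foldl (fun res i => res ++ [pvRowB flat ncols i]) []

-- ===== PRECONDITION & SPEC =====
def Spec_create_zigzag (rows : Int) (cols : Int) (start : Int) (out : List (List Int)) : Prop := out = create_zigzag_alt rows cols start
instance (rows : Int) (cols : Int) (start : Int) (out : List (List Int)) : Decidable (Spec_create_zigzag rows cols start out) := by unfold Spec_create_zigzag; infer_instance

-- ===== CLAIM (what is proved, stated in full; the proofs are below) =====
def Claim_equal_create_zigzag : Prop := ∀ (rows : Int) (cols : Int) (start : Int), Dom_create_zigzag rows cols start → Spec_create_zigzag rows cols start (create_zigzag rows cols start)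

-- ===== LEMMAS AND PROOFS =====

-- common reference value: row i is [start+i*m, …, start+i*m+m-1] (m = cols.toNat), reversed when i is odd
def pvRow (s : Int) (m : Nat) : List Int := (List.range m).map (fun (j : Nat) => s + (j : Int))

def pvZig (cols start : Int) (i : Nat) : List Int :=
  let r := pvRow (start + i * (cols.toNat : Int)) cols.toNat
  if i % 2 = 1 then r.reverse else r

def pvRef (cols start : Int) (n : Nat) : List (List Int) := (List.range n).map (pvZig cols start)

lemma pvRow_succ_left (s : Int) (k : Nat) : pvRow s (k + 1) = s :: pvRow (s + 1) k := by
  apply List.ext_getElem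
  · simp [pvRow]
  · intro i h1 h2
    cases i with
    | zero => simp [pvRow]
    | succ j =>
      simp only [pvRow, List.getElem_cons_succ, List.getElem_map, List.getElem_range]
      push_cast
      ring

lemma inner_fold (l : List Int) : ∀ (front : List (List Int)) (row : List Int) (s : Int),
    l.foldl pvInnerStepA (front ++ [row], s)
    = (front ++ [row ++ pvRow s l.length], s + l.length) := by
  induction l with
  | nil => intro front row s; simp [pvRow]
  | cons a t ih =>
    intro front row s
    have h1 : pvInnerStepA (front ++ [row], s) a = (front ++ [row ++ [s]], s + 1) := by
      simp [pvInnerStepA]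
    rw [List.foldl_cons, h1, ih front (row ++ [s]) (s + 1)]
    simp only [List.length_cons, pvRow_succ_left, Prod.mk.injEq]
    refine ⟨by simp, by push_cast; ring⟩

lemma outer_fold (cols start : Int) : ∀ n : Nat,
    (PySem.List.pyRange 0 (n : Int) 1).foldl (pvStepA cols) ([], 0, start)
    = (pvRef cols start n, ((n % 2 : Nat) : Int), start + n * (cols.toNat : Int)) := by
  intro n
  induction n with
  | zero => simp [PySem.List.pyRange_one_eq_nil, pvRef]
  | succ k ih =>
    have hsplit : PySem.List.pyRange 0 ((k : Int) + 1) 1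
        = PySem.List.pyRange 0 (k : Int) 1 ++ [(k : Int)] := by
      exact PySem.List.pyRange_one_succ_right (by positivity)
    have hcast : ((k + 1 : Nat) : Int) = (k : Int) + 1 := by push_cast; ring
    rw [hcast, hsplit, List.foldl_append, ih, List.foldl_cons, List.foldl_nil]
    have hlen : (PySem.List.pyRange 0 cols 1).length = cols.toNat := by
      simpa using PySem.List.length_pyRange_one 0 cols
    have hinner := inner_fold (PySem.List.pyRange 0 cols 1)
      (pvRef cols start k) [] (start + k * (cols.toNat : Int))
    rw [hlen] at hinner
    have hrefsucc : pvRef cols start (k + 1)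
        = pvRef cols start k ++ [pvZig cols start k] := by
      simp [pvRef, List.range_succ]
    rcases Nat.even_or_odd k with hk | hk
    · have hmod : k % 2 = 0 := Nat.even_iff.mp hk
      have hmod1 : (k + 1) % 2 = 1 := by omega
      simp only [pvStepA, hmod, hinner, Int.natCast_zero]
      norm_num
      refine ⟨?_, by omega, by ring⟩
      rw [hrefsucc]
      simp [pvZig, hmod, Int.ofNat_toNat]
    · have hmod : k % 2 = 1 := Nat.odd_iff.mp hk
      have hmod1 : (k + 1) % 2 = 0 := by omega
      simp only [pvStepA, hmod, hinner, Int.natCast_one]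
      norm_num
      rw [PySem.List.slice?_none_none_neg_one]
      refine ⟨?_, by omega, by ring⟩
      rw [hrefsucc]
      simp [pvZig, hmod, Int.ofNat_toNat]

lemma A_eq_ref (rows cols start : Int) :
    create_zigzag rows cols start = pvRef cols start rows.toNat := by
  by_cases h : 0 ≤ rows
  · have : rows = (rows.toNat : Int) := (Int.toNat_of_nonneg h).symm
    rw [create_zigzag, this, outer_fold]
    congr 1
  · have h0 : rows.toNat = 0 := by omega
    rw [create_zigzag, PySem.List.pyRange_one_eq_nil (by omega)]
    simp [pvRef, h0]

-- B's loop 'res := res ++ [g i]' over pyRange is a map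
lemma B_as_map (rows cols start : Int) :
    create_zigzag_alt rows cols start
    = (PySem.List.pyRange 0 (max rows 0) 1).map
        (pvRowB (PySem.List.pyRange start (start + max rows 0 * max cols 0) 1) (max cols 0)) := by
  rw [create_zigzag_alt]
  generalize PySem.List.pyRange start (start + max rows 0 * max cols 0) 1 = flat
  generalize PySem.List.pyRange 0 (max rows 0) 1 = l
  induction l using List.reverseRecOn with
  | nil => simp
  | append_singleton t x ih => simp [ih]

lemma drop_take_range_map (start : Int) (N d m : Nat) (hd : d + m ≤ N) :
    (((List.range N).map (fun (k : Nat) => start + (k : Int))).drop d).take m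
    = (List.range m).map (fun (j : Nat) => (start + (d : Int)) + (j : Int)) := by
  apply List.ext_getElem
  · simp
    omega
  · intro i h1 h2
    simp only [List.getElem_take, List.getElem_drop, List.getElem_map, List.getElem_range]
    push_cast
    ring

lemma B_row_eq (r c start i : Int) (hr : 0 ≤ r) (hc0 : 0 ≤ c) (h0 : 0 ≤ i) (h1 : i < r) :
    pvRowB (PySem.List.pyRange start (start + r * c) 1) c i
    = pvZig c start i.toNat := by
  have hi : (i.toNat : Int) = i := Int.toNat_of_nonneg h0
  by_cases hc : c ≤ 0
  · -- c = 0: flat is empty and every slice is []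
    have hflat : PySem.List.pyRange start (start + r * c) 1 = [] := by
      apply PySem.List.pyRange_one_eq_nil
      nlinarith [mul_nonneg hr (neg_nonneg.mpr hc)]
    have hm : c.toNat = 0 := by omega
    simp only [pvRowB, pvZig, hflat, hm, pvRow, List.range_zero, List.map_nil]
    rw [PySem.List.slice, PySem.List.slice?]
    simp
  · -- c > 0
    replace hc : 0 < c := by omega
    have hflat : PySem.List.pyRange start (start + r * c) 1
        = (List.range (r * c).toNat).map (fun (k : Nat) => start + (k : Int)) := by
      rw [PySem.List.pyRange_one]
      have he : start + r * c - start = r * c := by ring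
      rw [he]
    have hsl : PySem.List.slice (PySem.List.pyRange start (start + r * c) 1)
        (some (i * c)) (some ((i + 1) * c))
        = (List.range c.toNat).map
            (fun (j : Nat) => (start + i * (c.toNat : Int)) + (j : Int)) := by
      rw [PySem.List.slice_toNat _ (by positivity) (by positivity), hflat]
      have ht1 : (i * c).toNat = i.toNat * c.toNat := by
        rw [Int.toNat_mul h0 (le_of_lt hc)]
      have ht2 : ((i + 1) * c).toNat = (i.toNat + 1) * c.toNat := by
        rw [Int.toNat_mul (by omega) (le_of_lt hc)]
        congr 1
        omega
      have hcount : ((i + 1) * c).toNat - (i * c).toNat = c.toNat := by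
        rw [ht1, ht2]
        ring_nf
        omega
      rw [hcount, ht1]
      rw [drop_take_range_map start _ (i.toNat * c.toNat) c.toNat
        (by
          have h2 : (((i.toNat + 1) * c.toNat : Nat) : Int) ≤ r * c := by
            have he : (((i.toNat + 1) * c.toNat : Nat) : Int) = (i + 1) * c := by
              push_cast [hi, Int.toNat_of_nonneg (le_of_lt hc)]
              ring
            rw [he]
            exact mul_le_mul_of_nonneg_right (by omega) (le_of_lt hc)
          omega)]
      apply List.map_congr_left
      intro j _
      push_cast [hi]
      ring
    have hmm : PySem.Int.mod i 2 = i % 2 := PySem.Int.mod_eq_emod_of_pos (by omega)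
    simp only [pvRowB, hsl, pvZig, pvRow, hmm]
    by_cases hodd : i % 2 = 1
    · have h2 : i.toNat % 2 = 1 := by omega
      simp [hodd, h2, PySem.List.slice?_none_none_neg_one, hi]
    · have h2 : ¬ i.toNat % 2 = 1 := by omega
      simp [hodd, h2, hi]

lemma pvZig_max (cols start : Int) (k : Nat) :
    pvZig (max cols 0) start k = pvZig cols start k := by
  have h : (max cols 0).toNat = cols.toNat := by omega
  simp only [pvZig, h]

lemma B_eq_ref (rows cols start : Int) :
    create_zigzag_alt rows cols start = pvRef cols start rows.toNat := by
  rw [B_as_map, pvRef]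
  have hr : PySem.List.pyRange 0 (max rows 0) 1
      = (List.range rows.toNat).map (fun (k : Nat) => (k : Int)) := by
    rw [PySem.List.pyRange_one]
    have h1 : (max rows 0 - 0).toNat = rows.toNat := by omega
    rw [h1]
    simp
  rw [hr, List.map_map]
  apply List.map_congr_left
  intro k hk
  rw [List.mem_range] at hk
  have hb := B_row_eq (max rows 0) (max cols 0) start (k : Int)
    (by omega) (by omega) (Int.natCast_nonneg k) (by omega)
  have hz := pvZig_max cols start k
  simp only [Function.comp_apply]
  rw [hb]
  rw [show ((k : Int)).toNat = k from Int.toNat_natCast k]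
  exact hz

-- ===== VERDICT (by name: the statement is the Claim_ definition above) =====
theorem create_zigzag_spec : Claim_equal_create_zigzag := by
  intro rows cols start _
  unfold Spec_create_zigzag
  rw [A_eq_ref, B_eq_ref]
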